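-- pv_equiv track=rewrite | github.com/roypel/cs-projects | Python/Extended Introduction to CS/hw5.py | suffix_prefix_overlap_hash2
-- ===== SOURCE A (Python) =====
-- def suffix_prefix_overlap_hash2(lst, k):
--     d = {}
--     ans = []
--     for i in range(len(lst)):
--         suff = lst[i][-k:]
--         if suff in d:
--             d[suff].append(i)
--         else:
--             d[suff] = [i]
--     for j in range(len(lst)):
--         pref = lst[j][:k]
--         if pref in d:
--             tmp = d[pref]
--             for i in range(len(tmp)):
--                 if tmp[i] != j:
--                     ans.append((tmp[i],j))
--     return ans
-- ===== SOURCE B (Python) =====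
-- def suffix_prefix_overlap_hash2(lst, k):
--     n = len(lst)
--     ans = []
--     for j in range(n):
--         pref = lst[j][:k]
--         for i in range(n):
--             if i != j and lst[i][-k:] == pref:
--                 ans.append((i, j))
--     return ans
-- ===== Notes on version B (the rewrite author's own statement) =====
-- stated objective: simpler
-- what changed: Replaced the suffix-indexed hash dictionary and its two-phase build/lookup with a single direct nested scan comparing lst[i][-k:] to lst[j][:k].
import Mathlib
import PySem

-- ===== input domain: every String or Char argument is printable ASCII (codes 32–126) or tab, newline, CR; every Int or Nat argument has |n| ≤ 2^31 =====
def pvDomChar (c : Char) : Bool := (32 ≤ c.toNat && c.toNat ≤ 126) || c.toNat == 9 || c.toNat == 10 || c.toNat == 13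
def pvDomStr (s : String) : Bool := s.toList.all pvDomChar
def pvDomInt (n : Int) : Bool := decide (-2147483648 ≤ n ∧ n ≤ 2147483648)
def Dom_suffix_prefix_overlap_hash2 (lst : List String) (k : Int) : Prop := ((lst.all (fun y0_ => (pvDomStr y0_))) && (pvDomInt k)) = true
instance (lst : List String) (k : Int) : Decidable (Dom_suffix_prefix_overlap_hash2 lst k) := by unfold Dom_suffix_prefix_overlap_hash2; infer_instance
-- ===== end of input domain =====

-- B replaces A's suffix-keyed dictionary (build then look up) with one direct nested scan; simpler, not faster.

-- ===== PORT A =====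
-- lst[i][-k:] — the dict key computed in A's first loop
def pvSuffA (lst : List String) (k : Int) (i : Int) : String :=
  PySem.Str.slice (PySem.List.pyGetD lst i "") (some (-k)) none

-- one iteration of A's first loop: d[suff].append(i) / d[suff] = [i]
def pvStepA (lst : List String) (k : Int) (d : PySem.Dict String (List Int)) (i : Int) :
    PySem.Dict String (List Int) :=
  let suff := pvSuffA lst k i
  match d.get? suff with
  | some l => d.insert suff (l ++ [i])
  | none   => d.insert suff [i]

def suffix_prefix_overlap_hash2 (lst : List String) (k : Int) : List (Int × Int) :=
  let d := (PySem.List.pyRange 0 (lst.length : Int) 1).foldl (pvStepA lst k) PySem.Dict.empty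
  (PySem.List.pyRange 0 (lst.length : Int) 1).foldl (fun ans j =>
    match d.get? (PySem.Str.slice (PySem.List.pyGetD lst j "") none (some k)) with
    | some tmp =>
        (PySem.List.pyRange 0 (tmp.length : Int) 1).foldl (fun ans i =>
          if PySem.List.pyGetD tmp i 0 != j then ans ++ [(PySem.List.pyGetD tmp i 0, j)] else ans) ans
    | none => ans) []

-- ===== PORT B =====
def suffix_prefix_overlap_hash2_alt (lst : List String) (k : Int) : List (Int × Int) :=
  (PySem.List.pyRange 0 (lst.length : Int) 1).foldl (fun ans j =>
    (PySem.List.pyRange 0 (lst.length : Int) 1).foldl (fun ans i =>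
      if (i != j) && (PySem.Str.slice (PySem.List.pyGetD lst i "") (some (-k)) none == PySem.Str.slice (PySem.List.pyGetD lst j "") none (some k))
      then ans ++ [(i, j)] else ans) ans) []

-- ===== PRECONDITION & SPEC =====
def Spec_suffix_prefix_overlap_hash2 (lst : List String) (k : Int) (out : List (Int × Int)) : Prop := out = suffix_prefix_overlap_hash2_alt lst k
instance (lst : List String) (k : Int) (out : List (Int × Int)) : Decidable (Spec_suffix_prefix_overlap_hash2 lst k out) := by unfold Spec_suffix_prefix_overlap_hash2; infer_instance

-- ===== CLAIM (what is proved, stated in full; the proofs are below) =====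
def Claim_equal_suffix_prefix_overlap_hash2 : Prop := ∀ (lst : List String) (k : Int), Dom_suffix_prefix_overlap_hash2 lst k → Spec_suffix_prefix_overlap_hash2 lst k (suffix_prefix_overlap_hash2 lst k)

-- ===== LEMMAS AND PROOFS =====

-- after A's first loop, the dict maps p to the (in-order) indices whose suffix is p
lemma pvBuildA_get? (lst : List String) (k : Int) (p : String) :
    ∀ (ixs : List Int) (d : PySem.Dict String (List Int)),
    (ixs.foldl (pvStepA lst k) d).get? p =
      if (d.get? p).isSome || ixs.any (fun i => pvSuffA lst k i == p)
      then some ((d.get? p).getD [] ++ ixs.filter (fun i => pvSuffA lst k i == p))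
      else none := by
  intro ixs
  induction ixs with
  | nil =>
    intro d
    cases h : d.get? p <;> simp [h]
  | cons i t ih =>
    intro d
    simp only [List.foldl_cons, ih (pvStepA lst k d i), List.any_cons, List.filter_cons]
    by_cases hip : pvSuffA lst k i = p
    · subst hip
      simp only [pvStepA]
      cases h : d.get? (pvSuffA lst k i) <;>
        simp [PySem.Dict.get?_insert_self]
    · have hbe : (pvSuffA lst k i == p) = false := by
        simp [hip]
      have hne : p ≠ pvSuffA lst k i := fun h => hip h.symm
      have hget : (pvStepA lst k d i).get? p = d.get? p := by
        simp only [pvStepA]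
        cases h : d.get? (pvSuffA lst k i) <;>
          simp [PySem.Dict.get?_insert_of_ne _ _ hne]
      simp [hget, hbe]

-- ===== VERDICT (by name: the statement is the Claim_ definition above) =====
theorem suffix_prefix_overlap_hash2_spec : Claim_equal_suffix_prefix_overlap_hash2 := by
  intro lst k _
  unfold Spec_suffix_prefix_overlap_hash2 suffix_prefix_overlap_hash2 suffix_prefix_overlap_hash2_alt
  apply PySem.List.foldl_congr_mem
  intro acc j _
  set pref := PySem.Str.slice (PySem.List.pyGetD lst j "") none (some k) with hpref
  have hd := pvBuildA_get? lst k pref (PySem.List.pyRange 0 (lst.length : Int) 1) PySem.Dict.empty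
  simp only [PySem.Dict.get?_empty, Option.isSome_none, Bool.false_or, Option.getD_none,
    List.nil_append] at hd
  have hsfx : ∀ i : Int, PySem.Str.slice (PySem.List.pyGetD lst i "") (some (-k)) none = pvSuffA lst k i :=
    fun _ => rfl
  rw [hd]
  simp only [hsfx]
  by_cases hany : (PySem.List.pyRange 0 (lst.length : Int) 1).any (fun i => pvSuffA lst k i == pref)
  · rw [if_pos hany]
    show List.foldl _ acc (PySem.List.pyRange 0 (((PySem.List.pyRange 0 (lst.length : Int) 1).filter (fun i => pvSuffA lst k i == pref)).length : Int) 1) = _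
    rw [PySem.List.foldl_pyRange_zero_pyGetD'
      ((PySem.List.pyRange 0 (lst.length : Int) 1).filter (fun i => pvSuffA lst k i == pref)) 0
      (fun ans x => if x != j then ans ++ [(x, j)] else ans) acc]
    rw [PySem.List.foldl_append_if (fun x => x != j) (fun x => (x, j))]
    rw [PySem.List.foldl_append_if (fun i => (i != j) && (pvSuffA lst k i == pref)) (fun i => (i, j))]
    rw [List.filter_filter]
  · rw [if_neg hany]
    show acc = _
    rw [PySem.List.foldl_append_if (fun i => (i != j) && (pvSuffA lst k i == pref)) (fun i => (i, j))]
    have : (PySem.List.pyRange 0 (lst.length : Int) 1).filter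
        (fun i => (i != j) && (pvSuffA lst k i == pref)) = [] := by
      rw [List.filter_eq_nil_iff]
      intro i hi
      have := (List.any_eq_false).mp (Bool.eq_false_iff.mpr hany) i hi
      simp_all
    simp [this]
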